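-- pv_equiv track=rewrite | github.com/aderilus/runnersdash | preparedatasets.py | get_daily_agg_method
-- ===== SOURCE A (Python) =====
-- def get_daily_agg_method(list_of_cols):
--     """ Return aggregation method as a dictionary depending on the column name,
--         given a list of column names.
--         The appearance of keywords like "Total" and "Avg" within the column
--         name indicates 'sum' and 'mean' aggregation methods respectively.
--     """
--     agg = {}
--
--     for c in list_of_cols:
--         col = c.lower()
--
--         if 'total' in col:
--             agg[c] = 'sum'
--         elif 'avg' in col or 'average' in col:
--             agg[c] = 'mean'
--         elif 'maximum' in col:
--             agg[c] = 'max'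
--         elif 'minimum' in col:
--             agg[c] = 'min'
--         elif 'duration' in col:
--             # Previous elif will catch 'Avg Duration'
--             agg[c] = 'sum'
--         elif 'startdate' in col:
--             agg[c] = 'first'
--         elif 'enddate' in col:
--             agg[c] = 'last'
--         elif 'menstrual cycle start' in col.replace(' ', ''):
--             agg[c] = 'max'
--         elif 'elevation' in col:
--             agg[c] = 'sum'
--         elif 'weather' in col:
--             agg[c] = 'mean'
--         elif 'stepcount' in col.replace(' ', ''):
--             agg[c] = 'sum'
--         elif col == 'Date':
--             pass
--         else:
--             # VO2Max, BodyMass, Menstrual Flow (num), Indoor Workout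
--             # RestingHeartRate, HeartRateVariabilitySDNN, BloodPressure,
--             agg[c] = 'mean'
--
--     return agg
-- ===== SOURCE B (Python) =====
-- # B: table-driven dispatch — the precedence-ordered keyword rules become data
-- # scanned once per column; the two dead branches of A ('menstrual cycle start'
-- # searched in a space-stripped string, and col == 'Date' compared after
-- # lowercasing) can never fire and are omitted.
--
-- _RULES = [
--     ('total', 'sum'), ('avg', 'mean'), ('average', 'mean'),
--     ('maximum', 'max'), ('minimum', 'min'), ('duration', 'sum'),
--     ('startdate', 'first'), ('enddate', 'last'),
--     ('elevation', 'sum'), ('weather', 'mean'),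
-- ]
--
--
-- def _agg_method(c):
--     col = c.lower()
--     for kw, m in _RULES:
--         if kw in col:
--             return m
--     if 'stepcount' in col.replace(' ', ''):
--         return 'sum'
--     return 'mean'
--
--
-- def get_daily_agg_method(list_of_cols):
--     return {c: _agg_method(c) for c in list_of_cols}
-- ===== Notes on version B (the rewrite author's own statement) =====
-- stated objective: idiomatic
-- what changed: Replaces the 13-branch if/elif chain inside the loop with a precedence-ordered rule table scanned by a first-match lookup per column (a dict comprehension over a pure helper), dropping the two provably dead branches ('menstrual cycle start' searched inside a space-stripped string, and col == 'Date' tested after lowercasing).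
import Mathlib
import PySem

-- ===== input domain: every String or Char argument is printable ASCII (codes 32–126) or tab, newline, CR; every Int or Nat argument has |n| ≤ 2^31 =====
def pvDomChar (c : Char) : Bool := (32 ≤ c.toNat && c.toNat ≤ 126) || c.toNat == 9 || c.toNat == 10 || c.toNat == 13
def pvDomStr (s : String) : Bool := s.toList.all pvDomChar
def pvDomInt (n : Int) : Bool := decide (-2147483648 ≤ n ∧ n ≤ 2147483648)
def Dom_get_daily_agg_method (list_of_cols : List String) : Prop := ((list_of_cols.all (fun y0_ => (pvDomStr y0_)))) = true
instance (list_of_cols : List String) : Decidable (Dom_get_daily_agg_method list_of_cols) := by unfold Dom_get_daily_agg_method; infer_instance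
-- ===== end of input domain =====

-- B replaces the 13-branch if/elif chain with a precedence-ordered rule table scanned
-- by a first-match lookup per column (idiomatic, same cost); A's 'menstrual cycle start'
-- and col == 'Date' branches are provably dead and are omitted in B.

-- ===== PORT A =====
def get_daily_agg_method (list_of_cols : List String) : List (String × String) :=
  (list_of_cols.foldl (fun agg c =>
    let col := PySem.Str.lower c
    if PySem.Str.isIn "total" col then agg.insert c "sum"
    else if PySem.Str.isIn "avg" col || PySem.Str.isIn "average" col then agg.insert c "mean"
    else if PySem.Str.isIn "maximum" col then agg.insert c "max"
    else if PySem.Str.isIn "minimum" col then agg.insert c "min"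
    else if PySem.Str.isIn "duration" col then agg.insert c "sum"
    else if PySem.Str.isIn "startdate" col then agg.insert c "first"
    else if PySem.Str.isIn "enddate" col then agg.insert c "last"
    else if PySem.Str.isIn "menstrual cycle start" (PySem.Str.replace col " " "") then agg.insert c "max"
    else if PySem.Str.isIn "elevation" col then agg.insert c "sum"
    else if PySem.Str.isIn "weather" col then agg.insert c "mean"
    else if PySem.Str.isIn "stepcount" (PySem.Str.replace col " " "") then agg.insert c "sum"
    else if col == "Date" then agg
    else agg.insert c "mean") PySem.Dict.empty).items

-- ===== PORT B =====
def pvRules : List (String × String) :=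
  [("total", "sum"), ("avg", "mean"), ("average", "mean"),
   ("maximum", "max"), ("minimum", "min"), ("duration", "sum"),
   ("startdate", "first"), ("enddate", "last"),
   ("elevation", "sum"), ("weather", "mean")]

-- the for-loop of Source B's _agg_method with its early returns, as structural recursion
-- over the rule table; the post-loop default is the base case
def pvScan (rules : List (String × String)) (col : String) : String :=
  match rules with
  | [] => if PySem.Str.isIn "stepcount" (PySem.Str.replace col " " "") then "sum" else "mean"
  | r :: rest => if PySem.Str.isIn r.1 col then r.2 else pvScan rest col

def pvAggMethod (c : String) : String :=
  pvScan pvRules (PySem.Str.lower c)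

def get_daily_agg_method_alt (list_of_cols : List String) : List (String × String) :=
  (list_of_cols.foldl (fun d c => d.insert c (pvAggMethod c)) PySem.Dict.empty).items

-- ===== PRECONDITION & SPEC =====
def Spec_get_daily_agg_method (list_of_cols : List String) (out : List (String × String)) : Prop := out = get_daily_agg_method_alt list_of_cols
instance (list_of_cols : List String) (out : List (String × String)) : Decidable (Spec_get_daily_agg_method list_of_cols out) := by unfold Spec_get_daily_agg_method; infer_instance

-- ===== CLAIM (what is proved, stated in full; the proofs are below) =====
def Claim_equal_get_daily_agg_method : Prop := ∀ (list_of_cols : List String), Dom_get_daily_agg_method list_of_cols → Spec_get_daily_agg_method list_of_cols (get_daily_agg_method list_of_cols)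

-- ===== LEMMAS AND PROOFS =====

-- replace s ' ' '' leaves no space in the result
lemma no_space_replace_go (fuel : Nat) (l acc : List Char)
    (hl : l.length ≤ fuel) (hacc : ' ' ∉ acc) :
    ' ' ∉ PySem.Chars.replace.go [' '] [] fuel l acc := by
  induction fuel generalizing l acc with
  | zero =>
    match l with
    | [] => simpa [PySem.Chars.replace.go] using hacc
    | c :: t => simp at hl
  | succ n ih =>
    match l with
    | [] => simpa [PySem.Chars.replace.go] using hacc
    | c :: t =>
      simp only [PySem.Chars.replace.go]
      by_cases h : [' '].isPrefixOf (c :: t) = true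
      · simp only [h, if_pos]
        exact ih _ _ (by simp at hl ⊢; omega) hacc
      · simp only [h, if_neg, Bool.not_eq_true]
        have hc : c ≠ ' ' := by
          intro hce; apply h; simp [hce, List.isPrefixOf]
        exact ih _ _ (by simp at hl ⊢; omega) (by simp [hacc, Ne.symm hc])

lemma no_space_replace (s : List Char) : ' ' ∉ PySem.Chars.replace s [' '] [] := by
  simpa [PySem.Chars.replace, List.isEmpty] using
    no_space_replace_go s.length s [] le_rfl (by simp)

-- the 'menstrual cycle start' test of A can never succeed: the pattern contains a
-- space while the space-stripped string does not
lemma menstrual_dead (col : String) :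
    PySem.Str.isIn "menstrual cycle start" (PySem.Str.replace col " " "") = false := by
  rw [← Bool.not_eq_true, PySem.Str.isIn_iff_infix]
  intro hinf
  have hmem : ' ' ∈ (PySem.Str.replace col " " "").toList := by
    exact hinf.subset (by decide)
  rw [PySem.Str.toList_replace] at hmem
  exact no_space_replace _ (by simpa using hmem)

-- lowercasing never produces an uppercase letter, so col == "Date" is always false
lemma charOfNatToNat (n : Nat) (h : n < 55296) : (Char.ofNat n).toNat = n := by
  have hv : n.isValidChar := Or.inl h
  unfold Char.ofNat
  rw [dif_pos hv]
  rfl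

lemma lowerChar_ne_D (x : Char) : PySem.Chars.lowerChar x ≠ 'D' := by
  unfold PySem.Chars.lowerChar PySem.Chars.isupper
  by_cases h : ('A' ≤ x && decide (x ≤ 'Z')) = true
  · rw [if_pos h]
    simp only [Bool.and_eq_true, decide_eq_true_eq] at h
    have hA : (65 : Nat) ≤ x.toNat := h.1
    have hZ : x.toNat ≤ (90 : Nat) := h.2
    intro he
    have ht := congrArg Char.toNat he
    rw [charOfNatToNat (x.toNat + 32) (by omega)] at ht
    have : ('D' : Char).toNat = 68 := by decide
    omega
  · rw [if_neg h]
    intro he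
    exact h (by rw [he]; decide)

lemma date_dead (c : String) : (PySem.Str.lower c == "Date") = false := by
  rw [beq_eq_false_iff_ne]
  intro he
  have : (PySem.Str.lower c).toList = "Date".toList := by rw [he]
  rw [PySem.Str.toList_lower] at this
  unfold PySem.Chars.lower at this
  match hm : c.toList with
  | [] => rw [hm] at this; simp at this
  | x :: t =>
    rw [hm] at this
    simp only [List.map_cons] at this
    have : PySem.Chars.lowerChar x = 'D' := by
      have := congrArg (fun l => l.headD ' ') this
      simpa using this
    exact lowerChar_ne_D x this

-- per-column: A's if/elif chain computes exactly B's rule-table lookup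
set_option maxHeartbeats 2000000 in
lemma step_eq (c : String) (agg : PySem.Dict String String) :
    (let col := PySem.Str.lower c
     if PySem.Str.isIn "total" col then agg.insert c "sum"
     else if PySem.Str.isIn "avg" col || PySem.Str.isIn "average" col then agg.insert c "mean"
     else if PySem.Str.isIn "maximum" col then agg.insert c "max"
     else if PySem.Str.isIn "minimum" col then agg.insert c "min"
     else if PySem.Str.isIn "duration" col then agg.insert c "sum"
     else if PySem.Str.isIn "startdate" col then agg.insert c "first"
     else if PySem.Str.isIn "enddate" col then agg.insert c "last"
     else if PySem.Str.isIn "menstrual cycle start" (PySem.Str.replace col " " "") then agg.insert c "max"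
     else if PySem.Str.isIn "elevation" col then agg.insert c "sum"
     else if PySem.Str.isIn "weather" col then agg.insert c "mean"
     else if PySem.Str.isIn "stepcount" (PySem.Str.replace col " " "") then agg.insert c "sum"
     else if col == "Date" then agg
     else agg.insert c "mean")
    = agg.insert c (pvAggMethod c) := by
  simp only [pvAggMethod, pvRules, pvScan, menstrual_dead, date_dead,
    Bool.false_eq_true, if_false]
  split_ifs <;> simp_all

-- ===== VERDICT (by name: the statement is the Claim_ definition above) =====
theorem get_daily_agg_method_spec : Claim_equal_get_daily_agg_method := by
  intro list_of_cols _
  show get_daily_agg_method list_of_cols = get_daily_agg_method_alt list_of_cols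
  unfold get_daily_agg_method get_daily_agg_method_alt
  congr 1
  apply PySem.List.foldl_congr_mem
  intro agg c _
  exact step_eq c agg
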